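-- pv_equiv track=rewrite | github.com/Gildo2002/Advent-of-Code | Day05B.py | Count_double
-- ===== SOURCE A (Python) =====
-- def Count_double(val):
--     i =0
--     for x in range(0,len(val)):
--         for y in range(x+1,len(val)):
--             if(y+1 < len(val)):
--                 if (val[x] + val[y+1] == val[x]*2 and y - x == 1):
--                     i += 1
--                     break
--             else:
--                 continue
--     return i
-- ===== SOURCE B (Python) =====
-- def Count_double(val):
--     count = 0
--     for a, b in zip(val, val[2:]):
--         if a == b:
--             count += 1
--     return count
-- ===== Notes on version B (the rewrite author's own statement) =====
-- stated objective: faster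
-- what changed: Replaced A's quadratic nested index loops (inner scan with break, checking y-x==1 and val[x]+val[y+1]==val[x]*2) by a single pass over zip(val, val[2:]) counting equal pairs.
import Mathlib
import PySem

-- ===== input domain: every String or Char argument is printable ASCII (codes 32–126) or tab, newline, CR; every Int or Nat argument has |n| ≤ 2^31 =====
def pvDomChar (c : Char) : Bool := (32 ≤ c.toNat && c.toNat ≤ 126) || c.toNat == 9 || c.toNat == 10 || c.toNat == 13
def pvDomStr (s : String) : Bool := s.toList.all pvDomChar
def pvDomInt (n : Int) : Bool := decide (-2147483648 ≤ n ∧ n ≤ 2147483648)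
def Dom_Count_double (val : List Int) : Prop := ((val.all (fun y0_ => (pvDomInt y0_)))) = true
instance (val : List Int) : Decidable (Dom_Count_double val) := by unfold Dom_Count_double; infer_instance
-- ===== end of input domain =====

-- B replaces A's quadratic nested index loops by one linear pass over zip(val, val[2:]); return value only, no side effects.

-- ===== PORT A =====
-- inner 'for y in range(x+1, len(val))' loop with break/continue, as recursion over the range list
def CD_inner (val : List Int) (x : Int) : List Int → Int → Int
  | [], i => i
  | y :: ys, i =>
    if y + 1 < (val.length : Int) then
      if PySem.List.pyGetD val x 0 + PySem.List.pyGetD val (y + 1) 0 =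
           PySem.List.pyGetD val x 0 * 2 ∧ y - x = 1 then
        i + 1  -- break
      else CD_inner val x ys i
    else CD_inner val x ys i  -- continue

def Count_double (val : List Int) : Int :=
  (PySem.List.pyRange 0 (val.length : Int) 1).foldl
    (fun i x => CD_inner val x (PySem.List.pyRange (x + 1) (val.length : Int) 1) i) 0

-- ===== PORT B =====
def Count_double_alt (val : List Int) : Int :=
  (val.zip (PySem.List.slice val (some 2) none)).foldl
    (fun count p => if p.1 = p.2 then count + 1 else count) 0

-- ===== PRECONDITION & SPEC =====
def Spec_Count_double (val : List Int) (out : Int) : Prop := out = Count_double_alt val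
instance (val : List Int) (out : Int) : Decidable (Spec_Count_double val out) := by unfold Spec_Count_double; infer_instance

-- ===== CLAIM (what is proved, stated in full; the proofs are below) =====
def Claim_equal_Count_double : Prop := ∀ (val : List Int), Dom_Count_double val → Spec_Count_double val (Count_double val)

-- ===== LEMMAS AND PROOFS =====

-- the indicator A's x-th outer iteration adds
def CD_ind (val : List Int) (x : Int) : Int :=
  if x + 2 < (val.length : Int) ∧ PySem.List.pyGetD val x 0 = PySem.List.pyGetD val (x + 2) 0
  then 1 else 0

-- B's step function
def CD_step (c : Int) (p : Int × Int) : Int := if p.1 = p.2 then c + 1 else c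

lemma CD_inner_skip (val : List Int) (x : Int) :
    ∀ ys : List Int, (∀ y ∈ ys, y - x ≠ 1) → ∀ i, CD_inner val x ys i = i := by
  intro ys
  induction ys with
  | nil => intro _ i; rfl
  | cons y ys ih =>
    intro h i
    have hy : y - x ≠ 1 := h y (by simp)
    have hrest := ih (fun z hz => h z (by simp [hz]))
    simp only [CD_inner]
    split_ifs with h1 h2
    · exact absurd h2.2 hy
    · exact hrest i
    · exact hrest i

lemma CD_inner_eq (val : List Int) (x : Int) (i : Int) :
    CD_inner val x (PySem.List.pyRange (x + 1) (val.length : Int) 1) i = i + CD_ind val x := by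
  by_cases h : x + 1 < (val.length : Int)
  · rw [PySem.List.pyRange_one_cons h]
    have hskip : ∀ j, CD_inner val x (PySem.List.pyRange (x + 1 + 1) (val.length : Int) 1) j = j := by
      intro j
      apply CD_inner_skip
      intro y hy
      have := (PySem.List.mem_pyRange_one).mp hy
      omega
    simp only [CD_inner]
    by_cases h2 : x + 1 + 1 < (val.length : Int)
    · rw [if_pos h2]
      by_cases he : PySem.List.pyGetD val x 0 = PySem.List.pyGetD val (x + 2) 0
      · have : PySem.List.pyGetD val x 0 + PySem.List.pyGetD val (x + 1 + 1) 0 =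
            PySem.List.pyGetD val x 0 * 2 ∧ x + 1 - x = 1 := by
          constructor
          · have : x + 1 + 1 = x + 2 := by ring
            rw [this, ← he]; ring
          · ring
        rw [if_pos this]
        simp only [CD_ind]
        rw [if_pos ⟨by omega, he⟩]
      · have hcond : ¬ (PySem.List.pyGetD val x 0 + PySem.List.pyGetD val (x + 1 + 1) 0 =
            PySem.List.pyGetD val x 0 * 2 ∧ x + 1 - x = 1) := by
          intro ⟨h1, _⟩
          apply he
          have : x + 1 + 1 = x + 2 := by ring
          rw [this] at h1
          omega
        rw [if_neg hcond, hskip]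
        simp only [CD_ind]
        rw [if_neg (by tauto)]
        ring
    · rw [if_neg h2, hskip]
      simp only [CD_ind]
      rw [if_neg (by omega)]
      ring
  · rw [PySem.List.pyRange_one_eq_nil (by omega)]
    simp only [CD_inner, CD_ind]
    rw [if_neg (by omega)]
    ring

lemma CD_step_extract : ∀ (l : List (Int × Int)) (i : Int),
    l.foldl CD_step i = i + l.foldl CD_step 0 := by
  intro l
  induction l with
  | nil => intro i; simp
  | cons p l ih =>
    intro i
    simp only [List.foldl_cons]
    rw [ih (CD_step i p), ih (CD_step 0 p)]
    simp only [CD_step]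
    split_ifs <;> ring

lemma CD_ind_shift (a : Int) (l : List Int) (k : ℕ) :
    CD_ind (a :: l) ((k : Int) + 1) = CD_ind l (k : Int) := by
  have e1 : PySem.List.pyGetD (a :: l) ((k : Int) + 1) 0 = PySem.List.pyGetD l (k : Int) 0 := by
    rw [show ((k : Int) + 1) = ((k + 1 : ℕ) : Int) from by push_cast; ring,
        PySem.List.pyGetD_natCast, PySem.List.pyGetD_natCast, List.getD_cons_succ]
  have e2 : PySem.List.pyGetD (a :: l) ((k : Int) + 1 + 2) 0 =
      PySem.List.pyGetD l ((k : Int) + 2) 0 := by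
    rw [show ((k : Int) + 1 + 2) = ((k + 3 : ℕ) : Int) from by push_cast; ring,
        show ((k : Int) + 2) = ((k + 2 : ℕ) : Int) from by push_cast; ring,
        PySem.List.pyGetD_natCast, PySem.List.pyGetD_natCast]
    rfl
  simp only [CD_ind, e1, e2]
  have hiff : ((k : Int) + 1 + 2 < ((a :: l).length : Int) ∧
        PySem.List.pyGetD l (k : Int) 0 = PySem.List.pyGetD l ((k : Int) + 2) 0) ↔
      ((k : Int) + 2 < (l.length : Int) ∧
        PySem.List.pyGetD l (k : Int) 0 = PySem.List.pyGetD l ((k : Int) + 2) 0) := by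
    constructor <;> rintro ⟨h, hx⟩ <;> refine ⟨?_, hx⟩ <;>
      simp only [List.length_cons] at * <;> push_cast at * <;> omega
  simp only [hiff]

lemma CD_head (a : Int) (l : List Int) :
    CD_ind (a :: l) 0 + (l.zip (l.drop 2)).foldl CD_step 0 =
      ((a :: l).zip ((a :: l).drop 2)).foldl CD_step 0 := by
  match l with
  | [] => simp [CD_ind]
  | [b] => simp [CD_ind]
  | b :: c :: r =>
    have hz : (a :: b :: c :: r).zip ((a :: b :: c :: r).drop 2) =
        (a, c) :: ((b :: c :: r).zip r) := by simp
    have hz2 : (b :: c :: r).zip ((b :: c :: r).drop 2) = (b :: c :: r).zip r := by simp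
    rw [hz, hz2, List.foldl_cons, CD_step_extract (((b :: c :: r).zip r)) (CD_step 0 (a, c))]
    have hind : CD_ind (a :: b :: c :: r) 0 = CD_step 0 (a, c) := by
      simp only [CD_ind, CD_step, zero_add]
      have h2 : PySem.List.pyGetD (a :: b :: c :: r) 2 0 = c := by
        rw [show ((2 : Int)) = ((2 : ℕ) : Int) from by norm_num, PySem.List.pyGetD_natCast]; rfl
      rw [PySem.List.pyGetD_zero_cons, h2]
      have hlen : (2 : Int) < (((a :: b :: c :: r).length : ℕ) : Int) := by
        simp only [List.length_cons]; push_cast; omega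
      by_cases h : a = c
      · rw [if_pos ⟨hlen, h⟩, if_pos h]
      · rw [if_neg (fun hc => h hc.2), if_neg h]
    rw [hind]

lemma CD_sum (val : List Int) : ∀ i0 : Int,
    (List.range val.length).foldl (fun (i : Int) (k : ℕ) => i + CD_ind val (k : Int)) i0 =
      i0 + (val.zip (val.drop 2)).foldl CD_step 0 := by
  induction val with
  | nil => intro i0; simp
  | cons a l ih =>
    intro i0
    rw [List.length_cons, List.range_succ_eq_map, List.foldl_cons, List.foldl_map]
    have hsh : ∀ (i : Int) (k : ℕ), i + CD_ind (a :: l) ((k.succ : ℕ) : Int) = i + CD_ind l (k : Int) := by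
      intro i k
      rw [show ((k.succ : ℕ) : Int) = (k : Int) + 1 from by push_cast; ring, CD_ind_shift]
    simp only [hsh]
    rw [ih (i0 + CD_ind (a :: l) ((0 : ℕ) : Int))]
    rw [show ((0 : ℕ) : Int) = 0 from rfl, ← CD_head a l]
    ring

-- ===== VERDICT (by name: the statement is the Claim_ definition above) =====
theorem Count_double_spec : Claim_equal_Count_double := by
  intro val _
  unfold Spec_Count_double Count_double Count_double_alt
  have hcongr :
      (PySem.List.pyRange 0 (val.length : Int) 1).foldl
        (fun i x => CD_inner val x (PySem.List.pyRange (x + 1) (val.length : Int) 1) i) 0 =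
      (PySem.List.pyRange 0 (val.length : Int) 1).foldl (fun i x => i + CD_ind val x) 0 := by
    apply PySem.List.foldl_congr_mem
    intro i x _
    exact CD_inner_eq val x i
  rw [hcongr, PySem.List.pyRange_one]
  have hn : ((val.length : Int) - 0).toNat = val.length := by omega
  rw [hn, List.foldl_map]
  have hz : ∀ (i : Int) (k : ℕ), i + CD_ind val (0 + (k : Int)) = i + CD_ind val (k : Int) := by
    intro i k; rw [zero_add]
  simp only [hz]
  rw [CD_sum val 0]
  have hslice : PySem.List.slice val (some 2) none = val.drop 2 := by
    have : (2 : Int) = ((2 : ℕ) : Int) := by norm_num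
    rw [this, PySem.List.slice_from_natCast]
  rw [hslice]
  have : ∀ c : Int, ∀ p : Int × Int,
      (if p.1 = p.2 then c + 1 else c) = CD_step c p := by intro c p; rfl
  simp only [this]
  ring
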